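-- pv_equiv track=rewrite | github.com/davidrd123/latent-dreamer | daydreaming/Notes/Book/build_daydreamer_markdown.py | collect_title_lines
-- ===== SOURCE A (Python) =====
-- def next_nonempty(lines: list[str], start: int) -> tuple[int | None, str | None]:
--     for idx in range(start, len(lines)):
--         stripped = lines[idx].strip()
--         if stripped:
--             return idx, stripped
--     return None, None
--
-- def collect_title_lines(lines: list[str], start: int) -> list[str]:
--     title_lines: list[str] = []
--     idx, current = next_nonempty(lines, start)
--     while idx is not None and current is not None:
--         if is_probable_body_line(current) and title_lines:
--             break
--         title_lines.append(current)
--         next_idx = idx + 1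
--         if next_idx >= len(lines) or not lines[next_idx].strip():
--             break
--         idx, current = next_nonempty(lines, next_idx)
--     return title_lines
--
-- def is_probable_body_line(line: str) -> bool:
--     stripped = line.strip()
--     if not stripped:
--         return False
--     if stripped.endswith((".", "?", "!", ":")):
--         return True
--     if len(stripped) > 90:
--         return True
--     words = stripped.split()
--     if len(words) > 8:
--         return True
--     return False
-- ===== SOURCE B (Python) =====
-- def is_probable_body_line(line: str) -> bool:
--     stripped = line.strip()
--     if not stripped:
--         return False
--     if stripped.endswith((".", "?", "!", ":")):
--         return True
--     if len(stripped) > 90: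
--         return True
--     words = stripped.split()
--     if len(words) > 8:
--         return True
--     return False
--
-- def collect_title_lines(lines: list[str], start: int) -> list[str]:
--     n = len(lines)
--     # phase 1: advance past leading blank lines
--     i = start
--     while i < n and not lines[i].strip():
--         i += 1
--     # phase 2: materialize the block of consecutive non-blank lines (stripped)
--     block = []
--     while i < n and lines[i].strip():
--         block.append(lines[i].strip())
--         i += 1
--     # phase 3: truncate at the first body-like line (never the first)
--     result = []
--     for s in block:
--         if is_probable_body_line(s) and result:
--             break
--         result.append(s)
--     return result
-- ===== Notes on version B (the rewrite author's own statement) =====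
-- stated objective: simpler
-- what changed: A's interleaved while-loop that peeks at the next line and re-invokes a forward-scanning next_nonempty helper is replaced by three plain sequential passes: advance an index past leading blank lines, materialize the block of consecutive non-blank stripped lines, then truncate that block at the first body-like line (keeping the first element).
import Mathlib
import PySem

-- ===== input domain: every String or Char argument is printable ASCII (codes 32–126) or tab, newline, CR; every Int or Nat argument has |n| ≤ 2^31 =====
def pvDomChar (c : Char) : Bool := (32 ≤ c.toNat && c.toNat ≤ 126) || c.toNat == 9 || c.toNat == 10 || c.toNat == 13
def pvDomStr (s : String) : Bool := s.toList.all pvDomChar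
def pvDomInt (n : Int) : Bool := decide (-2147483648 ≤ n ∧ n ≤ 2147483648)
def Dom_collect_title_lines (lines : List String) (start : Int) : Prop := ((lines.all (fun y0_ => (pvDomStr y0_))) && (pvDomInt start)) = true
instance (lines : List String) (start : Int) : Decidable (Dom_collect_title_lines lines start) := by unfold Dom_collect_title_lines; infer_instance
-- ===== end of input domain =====

-- B re-decomposes A's peek-and-rescan while-loop into three plain passes (skip blanks,
-- materialize the stripped block, truncate at the first body-like line); same return value.

-- ===== PORT A =====
-- shared module helper is_probable_body_line (used verbatim by both Python versions)
def pv_is_probable_body_line (line : String) : Bool :=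
  let stripped := PySem.Str.strip line
  if stripped = "" then false
  else if PySem.Str.endswith stripped "." || PySem.Str.endswith stripped "?" ||
          PySem.Str.endswith stripped "!" || PySem.Str.endswith stripped ":" then true
  else if PySem.Str.len stripped > 90 then true
  else if (PySem.Str.split₀ stripped).length > 8 then true
  else false

-- next_nonempty: 'for idx in range(start, len(lines))', fuel = number of remaining indices;
-- pyGet? returning none is Python's IndexError (excluded by Pre_), ported as the none result
def pv_next_nonempty_go (lines : List String) (idx : Int) : Nat → Option (Int × String)
  | 0 => none
  | n + 1 =>
    match PySem.List.pyGet? lines idx with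
    | none => none
    | some line =>
      let stripped := PySem.Str.strip line
      if stripped = "" then pv_next_nonempty_go lines (idx + 1) n
      else some (idx, stripped)

def pv_next_nonempty (lines : List String) (start : Int) : Option (Int × String) :=
  pv_next_nonempty_go lines start (PySem.List.len lines - start).toNat

-- the while-loop of A; idx strictly increases and stays < len, so 2*len+1 fuel never runs out
def pv_ctl_go (lines : List String) : Option (Int × String) → List String → Nat → List String
  | none, acc, _ => acc
  | some _, acc, 0 => acc
  | some (idx, current), acc, n + 1 =>
    if pv_is_probable_body_line current && !acc.isEmpty then acc
    else
      let acc' := acc ++ [current]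
      let next_idx := idx + 1
      if next_idx ≥ PySem.List.len lines ∨ PySem.Str.strip (PySem.List.pyGetD lines next_idx "") = "" then acc'
      else pv_ctl_go lines (pv_next_nonempty lines next_idx) acc' n

def collect_title_lines (lines : List String) (start : Int) : List String :=
  pv_ctl_go lines (pv_next_nonempty lines start) [] (2 * lines.length + 1)

-- ===== PORT B =====
-- phase 1: advance i past leading blank lines
def pv_b_skip (lines : List String) (i : Int) : Nat → Int
  | 0 => i
  | n + 1 =>
    if i < PySem.List.len lines ∧ PySem.Str.strip (PySem.List.pyGetD lines i "") = "" then
      pv_b_skip lines (i + 1) n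
    else i

-- phase 2: the block of consecutive non-blank lines, stripped
def pv_b_collect (lines : List String) (i : Int) : Nat → List String
  | 0 => []
  | n + 1 =>
    if i < PySem.List.len lines ∧ ¬ PySem.Str.strip (PySem.List.pyGetD lines i "") = "" then
      PySem.Str.strip (PySem.List.pyGetD lines i "") :: pv_b_collect lines (i + 1) n
    else []

-- phase 3: truncate at the first body-like line, never dropping the first element
def pv_b_truncate (res : List String) : List String → List String
  | [] => res
  | s :: rest =>
    if pv_is_probable_body_line s && !res.isEmpty then res
    else pv_b_truncate (res ++ [s]) rest

def collect_title_lines_alt (lines : List String) (start : Int) : List String :=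
  let i := pv_b_skip lines start (PySem.List.len lines - start).toNat
  pv_b_truncate [] (pv_b_collect lines i (PySem.List.len lines - i).toNat)

-- ===== PRECONDITION & SPEC =====
-- Pre_ excludes exactly the inputs where Python A raises IndexError (start < -len(lines):
-- the very first lines[start] access wraps below the list); Python B raises there too.
def Pre_collect_title_lines (lines : List String) (start : Int) : Prop :=
  -(lines.length : Int) ≤ start
instance (lines : List String) (start : Int) : Decidable (Pre_collect_title_lines lines start) := by
  unfold Pre_collect_title_lines; infer_instance

def pvWitness_collect_title_lines : List String × Int := (["", "A Title", "Second Line", "", "Body text."], 0)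

def Spec_collect_title_lines (lines : List String) (start : Int) (out : List String) : Prop := out = collect_title_lines_alt lines start
instance (lines : List String) (start : Int) (out : List String) : Decidable (Spec_collect_title_lines lines start out) := by unfold Spec_collect_title_lines; infer_instance

-- ===== CLAIM (what is proved, stated in full; the proofs are below) =====
def Claim_equal_collect_title_lines : Prop := ∀ (lines : List String) (start : Int), Dom_collect_title_lines lines start → Pre_collect_title_lines lines start → Spec_collect_title_lines lines start (collect_title_lines lines start)

-- ===== LEMMAS AND PROOFS =====

theorem pv_pyGet?_inrange (xs : List String) (i : Int)
    (h1 : -(xs.length : Int) ≤ i) (h2 : i < xs.length) :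
    PySem.List.pyGet? xs i = some (PySem.List.pyGetD xs i "") := by
  simp only [PySem.List.pyGet?, PySem.List.pyGetD, PySem.List.pyIdx?]
  by_cases hp : 0 ≤ i
  · rw [if_pos hp, if_pos h2]
    have hlt : i.toNat < xs.length := by omega
    simp [List.getElem?_eq_getElem hlt]
  · rw [if_neg hp, if_pos h1]
    have hlt : xs.length - (-i).toNat < xs.length := by omega
    simp [List.getElem?_eq_getElem hlt]

-- b_skip never decreases the index
theorem pv_b_skip_ge (lines : List String) :
    ∀ (n : Nat) (i : Int), i ≤ pv_b_skip lines i n := by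
  intro n
  induction n with
  | zero => intro i; simp [pv_b_skip]
  | succ n ih =>
    intro i
    simp only [pv_b_skip]
    split
    · exact le_trans (by omega) (ih (i + 1))
    · omega

-- next_nonempty is exactly: skip blanks, then report the index if it still lies in the list
theorem pv_nn_eq_skip (lines : List String) :
    ∀ (n : Nat) (idx : Int), -(lines.length : Int) ≤ idx → n = ((lines.length : Int) - idx).toNat →
    pv_next_nonempty_go lines idx n =
      (if pv_b_skip lines idx n < (lines.length : Int) then
        some (pv_b_skip lines idx n, PySem.Str.strip (PySem.List.pyGetD lines (pv_b_skip lines idx n) ""))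
      else none) := by
  intro n
  induction n with
  | zero =>
    intro idx h1 h2
    have hs : pv_b_skip lines idx 0 = idx := rfl
    rw [hs, if_neg (by omega)]
    rfl
  | succ n ih =>
    intro idx h1 h2
    have hlt : idx < (lines.length : Int) := by omega
    have hA : pv_next_nonempty_go lines idx (n + 1) =
        (if PySem.Str.strip (PySem.List.pyGetD lines idx "") = "" then
          pv_next_nonempty_go lines (idx + 1) n
        else some (idx, PySem.Str.strip (PySem.List.pyGetD lines idx ""))) := by
      simp only [pv_next_nonempty_go]
      rw [pv_pyGet?_inrange lines idx h1 hlt]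
    have hB : pv_b_skip lines idx (n + 1) =
        (if idx < PySem.List.len lines ∧ PySem.Str.strip (PySem.List.pyGetD lines idx "") = "" then
          pv_b_skip lines (idx + 1) n
        else idx) := by
      simp only [pv_b_skip]
    by_cases hb : PySem.Str.strip (PySem.List.pyGetD lines idx "") = ""
    · have hc : idx < PySem.List.len lines ∧ PySem.Str.strip (PySem.List.pyGetD lines idx "") = "" :=
        ⟨by simpa only [PySem.List.len_eq] using hlt, hb⟩
      rw [hA, if_pos hb, ih (idx + 1) (by omega) (by omega), hB, if_pos hc]
    · have hc : ¬ (idx < PySem.List.len lines ∧ PySem.Str.strip (PySem.List.pyGetD lines idx "") = "") :=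
        fun h => hb h.2
      rw [hA, if_neg hb, hB, if_neg hc, if_pos hlt]

-- the single nonempty-line step of next_nonempty
theorem pv_nn_hit (lines : List String) (idx : Int)
    (h1 : -(lines.length : Int) ≤ idx) (h2 : idx < lines.length)
    (hb : ¬ PySem.Str.strip (PySem.List.pyGetD lines idx "") = "") :
    pv_next_nonempty lines idx = some (idx, PySem.Str.strip (PySem.List.pyGetD lines idx "")) := by
  have hfuel : (PySem.List.len lines - idx).toNat = ((lines.length : Int) - idx - 1).toNat + 1 := by
    simp only [PySem.List.len_eq]; omega
  simp only [pv_next_nonempty, hfuel, pv_next_nonempty_go]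
  rw [pv_pyGet?_inrange lines idx h1 h2]
  dsimp only
  rw [if_neg hb]

-- main loop = truncate of the materialized block
theorem pv_loop_eq_truncate (lines : List String) :
    ∀ (m : Nat) (idx : Int) (acc : List String) (k : Nat),
      -(lines.length : Int) ≤ idx → idx < lines.length →
      ¬ PySem.Str.strip (PySem.List.pyGetD lines idx "") = "" →
      (m : Int) = lines.length - idx → m ≤ k →
      pv_ctl_go lines (some (idx, PySem.Str.strip (PySem.List.pyGetD lines idx ""))) acc k =
        pv_b_truncate acc (pv_b_collect lines idx m) := by
  intro m
  induction m with
  | zero => intro idx acc k h1 h2 h3 hm hk; omega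
  | succ m ih =>
    intro idx acc k h1 h2 h3 hm hk
    obtain ⟨k', rfl⟩ : ∃ k', k = k' + 1 := ⟨k - 1, by omega⟩
    simp only [pv_b_collect, PySem.List.len_eq]
    rw [if_pos ⟨h2, h3⟩]
    simp only [pv_ctl_go, pv_b_truncate]
    by_cases hbrk : pv_is_probable_body_line (PySem.Str.strip (PySem.List.pyGetD lines idx "")) && !acc.isEmpty
    · rw [if_pos hbrk, if_pos hbrk]
    · rw [if_neg hbrk, if_neg hbrk]
      by_cases hend : idx + 1 ≥ PySem.List.len lines ∨ PySem.Str.strip (PySem.List.pyGetD lines (idx + 1) "") = ""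
      · rw [if_pos hend]
        have hnil : pv_b_collect lines (idx + 1) m = [] := by
          cases m with
          | zero => simp [pv_b_collect]
          | succ m' =>
            simp only [pv_b_collect, PySem.List.len_eq]
            rw [if_neg]
            rcases hend with h | h
            · simp only [PySem.List.len_eq] at h; exact fun hc => absurd hc.1 (by omega)
            · exact fun hc => hc.2 h
        rw [hnil]
        simp [pv_b_truncate]
      · rw [if_neg hend]
        have hge : ¬ idx + 1 ≥ PySem.List.len lines := fun h => hend (Or.inl h)
        have hne' : ¬ PySem.Str.strip (PySem.List.pyGetD lines (idx + 1) "") = "" := fun h => hend (Or.inr h)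
        simp only [PySem.List.len_eq, not_le] at hge
        rw [pv_nn_hit lines (idx + 1) (by omega) (by omega) hne']
        exact ih (idx + 1) (acc ++ [PySem.Str.strip (PySem.List.pyGetD lines idx "")]) k'
          (by omega) (by omega) hne' (by omega) (by omega)

-- b_collect returns [] whenever the entry condition fails
theorem pv_b_collect_nil (lines : List String) (i : Int) (m : Nat)
    (h : ¬ (i < (lines.length : Int) ∧ ¬ PySem.Str.strip (PySem.List.pyGetD lines i "") = "")) :
    pv_b_collect lines i m = [] := by
  cases m with
  | zero => simp [pv_b_collect]
  | succ m' =>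
    simp only [pv_b_collect, PySem.List.len_eq]
    rw [if_neg h]

-- ===== VERDICT (by name: the statement is the Claim_ definition above) =====
theorem collect_title_lines_spec : Claim_equal_collect_title_lines := by
  intro lines start _hdom hpre
  unfold Pre_collect_title_lines at hpre
  unfold Spec_collect_title_lines collect_title_lines collect_title_lines_alt
  rw [show pv_next_nonempty lines start =
        pv_next_nonempty_go lines start (PySem.List.len lines - start).toNat from rfl,
      pv_nn_eq_skip lines (PySem.List.len lines - start).toNat start hpre
        (by simp only [PySem.List.len_eq])]
  dsimp only
  set i := pv_b_skip lines start (PySem.List.len lines - start).toNat with hi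
  have hige : start ≤ i := pv_b_skip_ge lines _ start
  by_cases hlt : i < (lines.length : Int)
  · simp only [hlt, if_pos]
    by_cases hne : PySem.Str.strip (PySem.List.pyGetD lines i "") = ""
    · have hsl : start ≤ (lines.length : Int) := le_trans hige (le_of_lt hlt)
      -- cannot happen: b_skip stops only at a nonempty line or past the end; but we do not
      -- need that fact: handle it directly by showing both sides are the truncation of []
      -- Actually b_skip may stop with fuel 0 only when i ≥ len; with i < len the stop
      -- condition gives a nonempty strip. Prove that invariant here.
      exfalso
      -- invariant: if pv_b_skip stops at i < len then strip lines[i] ≠ ""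
      have : ∀ (n : Nat) (j : Int), (n : Int) = lines.length - j →
          pv_b_skip lines j n < (lines.length : Int) →
          ¬ PySem.Str.strip (PySem.List.pyGetD lines (pv_b_skip lines j n) "") = "" := by
        intro n
        induction n with
        | zero => intro j hj hlt'; simp only [pv_b_skip] at hlt' ⊢; omega
        | succ n ihn =>
          intro j hj hlt'
          simp only [pv_b_skip, PySem.List.len_eq] at hlt' ⊢
          by_cases hc : j < (lines.length : Int) ∧ PySem.Str.strip (PySem.List.pyGetD lines j "") = ""
          · rw [if_pos hc] at hlt' ⊢; exact ihn (j + 1) (by omega) hlt'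
          · rw [if_neg hc] at hlt' ⊢
            exact fun hb => hc ⟨hlt', hb⟩
      have hfuel : ((PySem.List.len lines - start).toNat : Int) = lines.length - start := by
        simp only [PySem.List.len_eq]; omega
      exact this _ start hfuel (hi ▸ hlt) (hi ▸ hne)
    · have hfe : (PySem.List.len lines - i).toNat = ((lines.length : Int) - i).toNat := by
        simp only [PySem.List.len_eq]
      rw [hfe]
      exact pv_loop_eq_truncate lines ((lines.length : Int) - i).toNat i [] (2 * lines.length + 1)
        (by omega) hlt hne (by omega) (by omega)
  · rw [if_neg hlt]
    rw [pv_b_collect_nil lines i _ (fun hc => hlt hc.1)]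
    simp [pv_ctl_go, pv_b_truncate]
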